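-- pv_equiv track=rewrite | github.com/rdmunden/challenges | set_1/12.py | solution
-- ===== SOURCE A (Python) =====
-- def solution(S, K):
--     if len(S) <= K:
--         return len(S)
--
--     if len(S) == K+1:
--         return 1
--
--     if len(S) == K+2:
--         return 2
--
--     sizes = []
--
--     # for debugging, save messages
--     # messages = []
--
--     for x in range(len(S)-K):
--         s = [*S]
--         s[x:x+K] = ''
--         s = "".join(s)
--
--         m = ''
--         lastchar = ''
--         count = 1
--         for i in s:
--             if i == lastchar:
--                 count += 1
--             else:
--                 if count == 1:
--                     count = ''
--                 m += str(count) + lastchar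
--                 lastchar = i
--                 count = 1
--
--         if count == 1:
--             count = ''
--         m += str(count) + lastchar
--
--         # print (m)
--
--         sizes.append(len(m))
--
--         # for debugging, save messages
--         # messages.append(m)
--
--
--     min_size = min(sizes)
--
--     # for debugging, print all the messages with the min size
--     # print ("---")
--     # final = list(zip(sizes, messages))
--     # for i in final:
--     #     if i[0] == min_size:
--     #         print (i[1])
--
--     return min_size
-- ===== SOURCE B (Python) =====
-- def solution(S, K):
--     n = len(S)
--     if K >= n:
--         # nothing shorter than S itself can remain (A's convention: the whole string stays)
--         return n
--
--     def f(r):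
--         # encoded length of one run: the character plus its count (count omitted when 1)
--         return 1 + (len(str(r)) if r > 1 else 0)
--
--     W = n - K  # number of removal windows
--
--     # pre[x] = (RLE length, last-run length, last char) of the prefix S[:x]
--     pre = [(0, 0, '')]
--     L, a, last = 0, 0, ''
--     for ch in S[:W-1]:
--         if ch == last:
--             L, a = L - f(a) + f(a + 1), a + 1
--         else:
--             L, a, last = L + 1, 1, ch
--         pre.append((L, a, last))
--
--     # suf[j] = (RLE length, first-run length, first char) of the suffix of length j, S[n-j:]
--     suf = [(0, 0, '')]
--     L, b, first = 0, 0, ''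
--     for ch in reversed(S[K:]):
--         if ch == first:
--             L, b = L - f(b) + f(b + 1), b + 1
--         else:
--             L, b, first = L + 1, 1, ch
--         suf.append((L, b, first))
--
--     best = None
--     for x in range(W):
--         pL, a, last = pre[x]
--         sL, b, first = suf[W - x]
--         total = pL + sL
--         if x > 0 and last == first:
--             # the runs meeting at the junction merge into one run of length a+b
--             total -= f(a) + f(b) - f(a + b)
--         if best is None or total < best:
--             best = total
--     return best
-- ===== Notes on version B (the rewrite author's own statement) =====
-- stated objective: faster
-- what changed: Instead of re-encoding each of the N-K remainder strings from scratch, B precomputes prefix RLE lengths (with last-run data) and suffix RLE lengths (with first-run data) in two linear scans and gets each window's encoded length in O(1) by a junction-merge adjustment.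
-- outside the precondition, e.g. on solution('ab', -1): A returns 1, B raises IndexError; on solution('', -1): A returns 1, B raises IndexError
import Mathlib
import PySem

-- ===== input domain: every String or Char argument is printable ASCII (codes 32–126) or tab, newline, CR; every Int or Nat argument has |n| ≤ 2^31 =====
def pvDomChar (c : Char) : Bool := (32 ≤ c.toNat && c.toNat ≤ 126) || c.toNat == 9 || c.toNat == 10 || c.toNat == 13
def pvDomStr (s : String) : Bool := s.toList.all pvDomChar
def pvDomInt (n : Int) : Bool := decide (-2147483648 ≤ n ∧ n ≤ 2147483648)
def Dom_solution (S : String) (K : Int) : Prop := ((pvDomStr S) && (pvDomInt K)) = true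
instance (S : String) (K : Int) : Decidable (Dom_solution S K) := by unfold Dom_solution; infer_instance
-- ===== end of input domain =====

-- B replaces A's per-window re-encoding by two linear prefix/suffix RLE scans with an O(1)
-- junction-merge adjustment per window; a timing run measured it asymptotically faster.


-- ===== PORT A =====
-- inner loop body: state (m, lastchar, count); lastchar is '' or a 1-char string, kept as List Char
def solAStep (st : List Char × List Char × Int) (i : Char) : List Char × List Char × Int :=
  if [i] = st.2.1 then (st.1, st.2.1, st.2.2 + 1)
  else
    let cstr : List Char := if st.2.2 = 1 then [] else PySem.Int.toChars st.2.2
    (st.1 ++ cstr ++ st.2.1, [i], 1)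

-- the full inner loop plus the trailing "m += str(count) + lastchar"
def solAEncode (s : List Char) : List Char :=
  let st := s.foldl solAStep ([], [], 1)
  let cstr : List Char := if st.2.2 = 1 then [] else PySem.Int.toChars st.2.2
  st.1 ++ cstr ++ st.2.1

def solution (S : String) (K : Int) : Int :=
  let cs := S.toList
  let n : Int := cs.length
  if n ≤ K then n
  else if n = K + 1 then 1
  else if n = K + 2 then 2
  else
    let sizes := (PySem.List.pyRange 0 (n - K) 1).foldl
      (fun sizes x =>
        -- s[x:x+K] = '' deletes that slice: what remains is s[:x] ++ s[x+K:] (exact for this statement)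
        let s := PySem.List.slice cs none (some x) ++ PySem.List.slice cs (some (x + K)) none
        sizes ++ [((solAEncode s).length : Int)])
      []
      -- min of a list that is nonempty here (n - K ≥ 3); the default is never used
    (PySem.List.min? sizes (fun y => y)).getD 0

-- ===== PORT B =====
-- encoded length of one run of length r: the character plus its count (the count is omitted when 1)
def solBf (r : Int) : Int := 1 + (if 1 < r then ((PySem.Int.toChars r).length : Int) else 0)

-- shared body of B's two scan loops: state (RLE length, current-run length, current char as '' / 1-char string)
def solBStep (st : Int × Int × List Char) (ch : Char) : Int × Int × List Char :=
  if [ch] = st.2.2 then (st.1 - solBf st.2.1 + solBf (st.2.1 + 1), st.2.1 + 1, st.2.2)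
  else (st.1 + 1, 1, [ch])

-- one scan loop: fold the step over the characters, recording every intermediate state
def solBScan (t : List Char) : List (Int × Int × List Char) × (Int × Int × List Char) :=
  t.foldl (fun st ch =>
      let nxt := solBStep st.2 ch
      (st.1 ++ [nxt], nxt))
    ([(0, 0, [])], (0, 0, []))

def solution_alt (S : String) (K : Int) : Int :=
  let cs := S.toList
  let n : Int := cs.length
  if K ≥ n then n
  else
    let W := n - K
    let pre := (solBScan (PySem.List.slice cs none (some (W - 1)))).1
    let suf := (solBScan ((PySem.List.slice cs (some K) none).reverse)).1
    let best := (PySem.List.pyRange 0 W 1).foldl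
      (fun (best : Option Int) x =>
        let p := PySem.List.pyGetD pre x (0, 0, [])
        let s := PySem.List.pyGetD suf (W - x) (0, 0, [])
        let total := p.1 + s.1
        let total := if 0 < x ∧ p.2.2 = s.2.2
                     then total - (solBf p.2.1 + solBf s.2.1 - solBf (p.2.1 + s.2.1))
                     else total
        match best with
        | none => some total
        | some b => if total < b then some total else some b)
      none
    best.getD 0

-- window value: RLE length of the string with the K characters at positions [x, x+K) removed

-- ===== PRECONDITION & SPEC =====
-- Pre_ restricts to the natural domain of "remove K consecutive characters": it excludes negative K,
-- where A's negative slice bounds wrap around and delete unintended segments.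
def Pre_solution (S : String) (K : Int) : Prop := 0 ≤ K
instance (S : String) (K : Int) : Decidable (Pre_solution S K) := by unfold Pre_solution; infer_instance
def pvWitness_solution : String × Int := ("aabcc", 2)

def Spec_solution (S : String) (K : Int) (out : Int) : Prop := out = solution_alt S K
instance (S : String) (K : Int) (out : Int) : Decidable (Spec_solution S K out) := by unfold Spec_solution; infer_instance

-- ===== CLAIM (what is proved, stated in full; the proofs are below) =====
def Claim_equal_solution : Prop := ∀ (S : String) (K : Int), Dom_solution S K → Pre_solution S K → Spec_solution S K (solution S K)

-- ===== LEMMAS AND PROOFS =====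

def rleRuns : List Char → Int
  | [] => 0
  | c :: t => solBf (1 + ((t.takeWhile (· == c)).length : Int)) + rleRuns (t.dropWhile (· == c))
termination_by s => s.length
decreasing_by
  have := List.length_dropWhile_le (· == c) t
  simp only [List.length_cons]; omega

def frl : List Char → Int
  | [] => 0
  | c :: t => 1 + ((t.takeWhile (· == c)).length : Int)

theorem rleRuns_cons' (c : Char) (t : List Char) :
    rleRuns (c :: t) = solBf (1 + ((t.takeWhile (· == c)).length : Int)) + rleRuns (t.dropWhile (· == c)) := by
  rw [rleRuns]

theorem frl_cons (c : Char) (s : List Char) :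
    frl (c :: s) = if s.head? = some c then frl s + 1 else 1 := by
  cases s with
  | nil => simp [frl]
  | cons d t =>
    by_cases hdc : d = c
    · subst hdc
      simp [frl, List.takeWhile_cons]
      ring
    · simp [frl, List.takeWhile_cons, hdc, Ne.symm hdc]

theorem rleRuns_cons (c : Char) (s : List Char) :
    rleRuns (c :: s) = if s.head? = some c then rleRuns s - solBf (frl s) + solBf (frl s + 1)
                       else 1 + rleRuns s := by
  cases s with
  | nil => simp [rleRuns, solBf]
  | cons d t =>
    by_cases hdc : d = c
    · subst hdc
      rw [rleRuns, rleRuns]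
      simp [frl, List.takeWhile_cons, List.dropWhile_cons]
      ring_nf
    · have hb : (d == c) = false := by simp [hdc]
      rw [rleRuns]
      simp only [List.takeWhile_cons, List.dropWhile_cons, hb, List.head?_cons]
      have hne : ¬ (some d = some c) := by simp [hdc]
      rw [if_neg hne]
      simp [solBf]

def lra (s : List Char) : Int := frl s.reverse

def optToL : Option Char → List Char
  | none => []
  | some c => [c]

def statsP (u : List Char) : Int × Int × List Char := (rleRuns u, lra u, optToL u.getLast?)

def statsS (s : List Char) : Int × Int × List Char := (rleRuns s, frl s, optToL s.head?)

theorem solBf_one : solBf 1 = 1 := by simp [solBf]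

theorem statsS_cons (c : Char) (s : List Char) : statsS (c :: s) = solBStep (statsS s) c := by
  cases s with
  | nil =>
    simp [statsS, solBStep, optToL, rleRuns, frl, solBf]
  | cons d t =>
    by_cases hdc : d = c
    · subst hdc
      have h1 : rleRuns (d :: d :: t) = rleRuns (d :: t) - solBf (frl (d :: t)) + solBf (frl (d :: t) + 1) := by
        rw [rleRuns_cons d (d :: t)]; simp
      have h2 : frl (d :: d :: t) = frl (d :: t) + 1 := by
        rw [frl_cons d (d :: t)]; simp
      simp [statsS, solBStep, optToL, h1, h2]
    · have h1 : rleRuns (c :: d :: t) = 1 + rleRuns (d :: t) := by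
        rw [rleRuns_cons c (d :: t)]; simp [hdc]
      have h2 : frl (c :: d :: t) = 1 := by
        rw [frl_cons c (d :: t)]; simp [hdc]
      have hne2 : ¬ ([c] = [d]) := by simp [Ne.symm hdc]
      simp only [statsS, solBStep, optToL, List.head?_cons, h1, h2, if_neg hne2, Prod.mk.injEq]
      exact ⟨by ring, trivial⟩

theorem rleRuns_append (P Q : List Char) (hP : P ≠ []) :
    rleRuns (P ++ Q) = if P.getLast? = Q.head?
      then rleRuns P + rleRuns Q - solBf (lra P) - solBf (frl Q) + solBf (lra P + frl Q)
      else rleRuns P + rleRuns Q := by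
  induction P using List.reverseRecOn generalizing Q with
  | nil => exact absurd rfl hP
  | append_singleton u c ih =>
    have e2 : rleRuns [c] = 1 := by simp [rleRuns, solBf_one]
    have e3 : lra [c] = 1 := by simp [lra, frl]
    have ef : frl [c] = 1 := by simp [frl]
    by_cases hu : u = []
    · subst hu
      simp only [List.nil_append, List.singleton_append, List.getLast?_singleton]
      rw [rleRuns_cons c Q, e2, e3, solBf_one]
      cases hQ : Q.head? with
      | none =>
        have hne : ¬ ((some c : Option Char) = none) := by simp
        simp only [hQ, if_neg hne]
        simp
      | some e =>
        by_cases hec : e = c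
        · subst hec
          simp only [hQ, if_pos rfl]
          simp [solBf_one]
          try ring_nf
          try omega
        · have h1 : ¬ ((some e : Option Char) = some c) := by simp [hec]
          have h2 : ¬ ((some c : Option Char) = some e) := by simp [Ne.symm hec]
          simp only [hQ, if_neg h1, if_neg h2]
    · obtain ⟨d, hd⟩ : ∃ d, u.getLast? = some d := by
        cases h : u.getLast? with
        | none => exact absurd (List.getLast?_eq_none_iff.mp h) hu
        | some d => exact ⟨d, rfl⟩
      have hlra : lra (u ++ [c]) = if u.getLast? = some c then lra u + 1 else 1 := by
        simp only [lra, List.reverse_append, List.reverse_singleton, List.singleton_append]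
        rw [frl_cons c u.reverse, List.head?_reverse]
      have hassoc : (u ++ [c]) ++ Q = u ++ (c :: Q) := by simp
      have hlastc : (u ++ [c]).getLast? = some c := by simp
      rw [hassoc, ih (c :: Q) hu, hlastc, hlra, ih [c] hu, rleRuns_cons c Q, frl_cons c Q]
      simp only [List.head?_cons, List.getLast?_singleton, hd, e2, e3, ef, solBf_one]
      by_cases hdc : d = c
      · subst hdc
        simp only [if_pos rfl]
        cases hQ : Q.head? with
        | none =>
          have hne : ¬ ((some d : Option Char) = none) := by simp
          simp only [hQ, if_neg hne]
          simp [solBf_one, reduceCtorEq]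
          try ring_nf
          try omega
        | some e =>
          by_cases hec : e = d
          · subst hec
            simp only [hQ, if_pos rfl]
            simp [solBf_one]
            ring_nf
          · have hne : ¬ ((some d : Option Char) = some e) := by simp [Ne.symm hec]
            simp only [hQ, if_neg hne]
            simp [solBf_one, hec]
            ring_nf
      · have hne0 : ¬ ((some d : Option Char) = some c) := by simp [hdc]
        simp only [if_neg hne0, if_pos rfl]
        cases hQ : Q.head? with
        | none =>
          have hne : ¬ ((some c : Option Char) = none) := by simp
          simp only [hQ, if_neg hne]
          simp [solBf_one, reduceCtorEq]
          try ring_nf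
          try omega
        | some e =>
          by_cases hec : e = c
          · subst hec
            simp only [hQ, if_pos rfl]
            simp [solBf_one]
            rw [Int.add_comm 1 (frl Q)]
            omega
          · have hne : ¬ ((some c : Option Char) = some e) := by intro h; exact hec (Option.some.inj h).symm
            have hne2 : ¬ c = e := fun h => hec h.symm
            simp only [hQ, if_neg hne]
            simp [solBf_one, hec, hne2]
            try ring_nf
            try omega

theorem lra_snoc (u : List Char) (c : Char) :
    lra (u ++ [c]) = if u.getLast? = some c then lra u + 1 else 1 := by
  simp only [lra, List.reverse_append, List.reverse_singleton, List.singleton_append]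
  rw [frl_cons c u.reverse, List.head?_reverse]

theorem statsP_snoc (u : List Char) (c : Char) : statsP (u ++ [c]) = solBStep (statsP u) c := by
  by_cases hu : u = []
  · subst hu
    simp [statsP, solBStep, optToL, lra, frl, rleRuns, solBf_one]
  · obtain ⟨d, hd⟩ : ∃ d, u.getLast? = some d := by
      cases h : u.getLast? with
      | none => exact absurd (List.getLast?_eq_none_iff.mp h) hu
      | some d => exact ⟨d, rfl⟩
    have e2 : rleRuns [c] = 1 := by simp [rleRuns, solBf_one]
    have ef : frl [c] = 1 := by simp [frl]
    have happ := rleRuns_append u [c] hu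
    rw [e2, ef] at happ
    have hlast : (u ++ [c]).getLast? = some c := by simp
    by_cases hdc : d = c
    · have hcond : u.getLast? = [c].head? := by simp [hd, hdc]
      rw [if_pos hcond] at happ
      have hl2 : optToL u.getLast? = [c] := by rw [hd, hdc]; rfl
      have hgc : u.getLast? = some c := by rw [hd, hdc]
      simp only [statsP, solBStep, hl2, if_pos rfl]
      rw [happ, lra_snoc, hlast, if_pos hgc]
      simp [optToL, solBf_one, Prod.mk.injEq]
      ring
    · have hcond : ¬ (u.getLast? = [c].head?) := by simp [hd, hdc]
      rw [if_neg hcond] at happ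
      have hl2 : optToL u.getLast? = [d] := by rw [hd]; rfl
      have hne2 : ¬ ([c] = [d]) := by simp [Ne.symm hdc]
      simp only [statsP, solBStep, hl2, if_neg hne2]
      rw [happ, lra_snoc, hlast]
      have hcond2 : ¬ (u.getLast? = some c) := by simp [hd, hdc]
      simp [hcond2, optToL]

def solAFin (st : List Char × List Char × Int) : List Char :=
  st.1 ++ (if st.2.2 = 1 then [] else PySem.Int.toChars st.2.2) ++ st.2.1

theorem solA_L1 (Q : List Char) : ∀ (m : List Char) (c : Char) (k : Int), 1 ≤ k →
    ((solAFin (Q.foldl solAStep (m, [c], k))).length : Int)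
      = (m.length : Int) + solBf (k + ((Q.takeWhile (· == c)).length : Int))
        + rleRuns (Q.dropWhile (· == c)) := by
  induction Q with
  | nil =>
    intro m c k hk
    simp only [List.foldl_nil, solAFin, List.takeWhile_nil, List.dropWhile_nil]
    by_cases hk1 : k = 1
    · subst hk1; simp [rleRuns, solBf]
    · have h2 : 1 < k := by omega
      simp [hk1, solBf, h2, rleRuns]
      push_cast
      ring
  | cons i t ih =>
    intro m c k hk
    simp only [List.foldl_cons]
    by_cases hic : i = c
    · subst hic
      have hstep : solAStep (m, [i], k) i = (m, [i], k + 1) := by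
        simp [solAStep]
      rw [hstep, ih m i (k + 1) (by omega)]
      simp [List.takeWhile_cons, List.dropWhile_cons]
      push_cast
      ring_nf
    · have hne : ¬ ([i] = [c]) := by simp [hic]
      have hstep : solAStep (m, [c], k) i
          = (m ++ (if k = 1 then [] else PySem.Int.toChars k) ++ [c], [i], 1) := by
        simp [solAStep, hne]
      rw [hstep, ih _ i 1 (by omega)]
      have hb : (i == c) = false := by simp [hic]
      simp only [List.takeWhile_cons, List.dropWhile_cons, hb, if_false, Bool.false_eq_true,
        List.length_nil, List.length_append]
      rw [rleRuns_cons' i t]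
      by_cases hk1 : k = 1
      · subst hk1; simp [solBf_one]; ring
      · have h2 : 1 < k := by omega
        simp [hk1, solBf, h2]
        push_cast
        ring

theorem rleRuns_nil : rleRuns [] = 0 := by rw [rleRuns]

theorem solAEncode_eq_fin (s : List Char) : solAEncode s = solAFin (s.foldl solAStep ([], [], 1)) := rfl

theorem solA_encode_len (s : List Char) : ((solAEncode s).length : Int) = rleRuns s := by
  cases s with
  | nil => simp [solAEncode, solAFin, rleRuns_nil]
  | cons i t =>
    have h1 : solAStep ([], [], 1) i = ([], [i], 1) := by simp [solAStep]
    rw [solAEncode_eq_fin, List.foldl_cons, h1, solA_L1 t [] i 1 (by omega), rleRuns_cons' i t]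
    simp

def mkP (u : List Char) : List (Int × Int × List Char) × (Int × Int × List Char) :=
  ((List.range (u.length + 1)).map (fun j => statsP (u.take j)), statsP u)

def mkS (v : List Char) : List (Int × Int × List Char) × (Int × Int × List Char) :=
  ((List.range (v.length + 1)).map (fun j => statsS ((v.take j).reverse)), statsS v.reverse)

theorem statsP_nil : statsP [] = (0, 0, []) := by
  simp [statsP, lra, frl, optToL, rleRuns_nil]

theorem scanP (t : List Char) : ∀ u : List Char,
    t.foldl (fun st ch => ((st.1 ++ [solBStep st.2 ch], solBStep st.2 ch) :
        List (Int × Int × List Char) × (Int × Int × List Char))) (mkP u) = mkP (u ++ t) := by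
  induction t with
  | nil => intro u; simp
  | cons ch t ih =>
    intro u
    have hstep : ((mkP u).1 ++ [solBStep (mkP u).2 ch], solBStep (mkP u).2 ch) = mkP (u ++ [ch]) := by
      have hfin := statsP_snoc u ch
      simp only [mkP, ← hfin]
      have hR : (List.range ((u ++ [ch]).length + 1)).map (fun j => statsP ((u ++ [ch]).take j))
          = (List.range (u.length + 1)).map (fun j => statsP ((u ++ [ch]).take j))
            ++ [statsP (u ++ [ch])] := by
        have hlen : (u ++ [ch]).length + 1 = (u.length + 1) + 1 := by simp
        rw [hlen, List.range_succ, List.map_append]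
        congr 1
        have hfull : List.take (u.length + 1) (u ++ [ch]) = u ++ [ch] := by
          rw [show u.length + 1 = (u ++ [ch]).length by simp, List.take_length]
        simp [hfull]
      rw [hR]
      congr 2
      refine List.map_congr_left ?_
      intro j hj
      have hj' : j ≤ u.length := by
        have := List.mem_range.mp hj; omega
      rw [List.take_append_of_le_length hj']
    rw [List.foldl_cons, hstep, ih (u ++ [ch])]
    simp

theorem scanS (t : List Char) : ∀ v : List Char,
    t.foldl (fun st ch => ((st.1 ++ [solBStep st.2 ch], solBStep st.2 ch) :
        List (Int × Int × List Char) × (Int × Int × List Char))) (mkS v) = mkS (v ++ t) := by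
  induction t with
  | nil => intro v; simp
  | cons ch t ih =>
    intro v
    have hrev : (v ++ [ch]).reverse = ch :: v.reverse := by simp
    have hstep : ((mkS v).1 ++ [solBStep (mkS v).2 ch], solBStep (mkS v).2 ch) = mkS (v ++ [ch]) := by
      have hfin : statsS ((v ++ [ch]).reverse) = solBStep (statsS v.reverse) ch := by
        rw [hrev, statsS_cons]
      simp only [mkS, ← hfin]
      have hR : (List.range ((v ++ [ch]).length + 1)).map (fun j => statsS ((v ++ [ch]).take j).reverse)
          = (List.range (v.length + 1)).map (fun j => statsS ((v ++ [ch]).take j).reverse)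
            ++ [statsS ((v ++ [ch]).reverse)] := by
        have hlen : (v ++ [ch]).length + 1 = (v.length + 1) + 1 := by simp
        rw [hlen, List.range_succ, List.map_append]
        congr 1
        have hfull : List.take (v.length + 1) (v ++ [ch]) = v ++ [ch] := by
          rw [show v.length + 1 = (v ++ [ch]).length by simp, List.take_length]
        simp [hfull]
      rw [hR]
      congr 2
      refine List.map_congr_left ?_
      intro j hj
      have hj' : j ≤ v.length := by
        have := List.mem_range.mp hj; omega
      rw [List.take_append_of_le_length hj']
    rw [List.foldl_cons, hstep, ih (v ++ [ch])]
    simp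

def minStep : Option Int → Int → Option Int := fun best v =>
  match best with
  | none => some v
  | some b => if v < b then some v else some b

theorem minFold (xs : List Int) : ∀ m : Int, xs.foldl minStep (some m) = some (xs.foldl min m) := by
  induction xs with
  | nil => intro m; simp
  | cons v t ih =>
    intro m
    have h : minStep (some m) v = some (min m v) := by
      simp only [minStep]
      split_ifs with hvm <;> simp <;> omega
    rw [List.foldl_cons, h, ih, List.foldl_cons]

def winVal (cs : List Char) (K : Int) (x : Int) : Int :=
  rleRuns (cs.take x.toNat ++ cs.drop (x.toNat + K.toNat))

theorem solBScan_eq_mkP (t : List Char) : solBScan t = mkP t := by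
  have h0 : (([(0, 0, [])], (0, 0, [])) : List (Int × Int × List Char) × (Int × Int × List Char))
      = mkP [] := by simp [mkP, statsP_nil]
  rw [solBScan, h0]
  have := scanP t []
  simpa using this

theorem statsS_nil : statsS [] = (0, 0, []) := by simp [statsS, frl, optToL, rleRuns_nil]

theorem solBScan_eq_mkS (t : List Char) : solBScan t = mkS t := by
  have h0 : (([(0, 0, [])], (0, 0, [])) : List (Int × Int × List Char) × (Int × Int × List Char))
      = mkS [] := by simp [mkS, statsS_nil]
  rw [solBScan, h0]
  have := scanS t []
  simpa using this

theorem optToL_inj (a b : Option Char) : optToL a = optToL b ↔ a = b := by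
  cases a <;> cases b <;> simp [optToL]

theorem lookupP (cs : List Char) (K x : Int) (h0 : 0 ≤ K) (hKn : K < (cs.length : Int))
    (hx0 : 0 ≤ x) (hxW : x < (cs.length : Int) - K) :
    PySem.List.pyGetD (mkP (cs.take ((cs.length : Int) - K - 1).toNat)).1 x
      ((0, 0, []) : Int × Int × List Char) = statsP (cs.take x.toNat) := by
  have hlen : (cs.take ((cs.length : Int) - K - 1).toNat).length
      = ((cs.length : Int) - K - 1).toNat := by
    rw [List.length_take]
    omega
  rw [mkP]
  dsimp only
  rw [PySem.List.pyGetD_eq_getElem _ _ hx0 (by simp [hlen]; omega)]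
  rw [List.getElem_map, List.getElem_range, List.take_take]
  congr 1
  congr 1
  omega

theorem lookupS (cs : List Char) (K x : Int) (h0 : 0 ≤ K) (hKn : K < (cs.length : Int))
    (hx0 : 0 ≤ x) (hxW : x < (cs.length : Int) - K) :
    PySem.List.pyGetD (mkS ((cs.drop K.toNat).reverse)).1 ((cs.length : Int) - K - x)
      ((0, 0, []) : Int × Int × List Char) = statsS (cs.drop (x.toNat + K.toNat)) := by
  have hlen : ((cs.drop K.toNat).reverse).length = cs.length - K.toNat := by
    simp
  rw [mkS]
  dsimp only
  rw [PySem.List.pyGetD_eq_getElem _ _ (by omega) (by simp [hlen]; omega)]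
  rw [List.getElem_map, List.getElem_range]
  rw [List.take_reverse, List.reverse_reverse, List.drop_drop]
  congr 1
  simp only [List.length_drop]
  congr 1
  omega

theorem windowTotal (cs : List Char) (K x : Int) (h0 : 0 ≤ K) (hKn : K < (cs.length : Int))
    (hx0 : 0 ≤ x) (hxW : x < (cs.length : Int) - K) :
    (if 0 < x ∧ (statsP (cs.take x.toNat)).2.2 = (statsS (cs.drop (x.toNat + K.toNat))).2.2
     then (statsP (cs.take x.toNat)).1 + (statsS (cs.drop (x.toNat + K.toNat))).1
          - (solBf (statsP (cs.take x.toNat)).2.1 + solBf (statsS (cs.drop (x.toNat + K.toNat))).2.1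
             - solBf ((statsP (cs.take x.toNat)).2.1 + (statsS (cs.drop (x.toNat + K.toNat))).2.1))
     else (statsP (cs.take x.toNat)).1 + (statsS (cs.drop (x.toNat + K.toNat))).1)
    = winVal cs K x := by
  by_cases hx : 0 < x
  · have hcs : cs ≠ [] := by
      intro hcs
      rw [hcs] at hKn
      simp at hKn
      omega
    have hPne : cs.take x.toNat ≠ [] := by
      rw [Ne, List.take_eq_nil_iff]
      push_neg
      exact ⟨by omega, hcs⟩
    rw [winVal, rleRuns_append _ _ hPne]
    by_cases hj : (cs.take x.toNat).getLast? = (cs.drop (x.toNat + K.toNat)).head?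
    · rw [if_pos hj,
        if_pos ⟨hx, by simp only [statsP, statsS]; exact (optToL_inj _ _).mpr hj⟩]
      simp only [statsP, statsS]
      ring
    · rw [if_neg hj,
        if_neg (by
          intro hcon
          exact hj ((optToL_inj _ _).mp hcon.2))]
      simp only [statsP, statsS]
  · have hxz : x.toNat = 0 := by omega
    rw [if_neg (fun h => hx h.1), winVal, hxz]
    simp only [List.take_zero, List.nil_append, statsP_nil, statsS]
    ring

theorem foldl_minStep_eq_min? (v : Int) (vs : List Int) :
    (v :: vs).foldl minStep none = PySem.List.min? (v :: vs) (fun y => y) := by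
  rw [List.foldl_cons, PySem.List.min?_id_cons]
  exact minFold vs v

theorem alt_general (S : String) (K : Int) (h0 : 0 ≤ K) (hKn : K < (S.toList.length : Int)) :
    solution_alt S K
      = (PySem.List.min? ((PySem.List.pyRange 0 ((S.toList.length : Int) - K) 1).map
          (winVal S.toList K)) (fun y => y)).getD 0 := by
  have hKge : ¬ (K ≥ (S.toList.length : Int)) := by omega
  simp only [solution_alt, hKge, if_false]
  rw [PySem.List.slice_to _ (by omega : (0:Int) ≤ (S.toList.length : Int) - K - 1),
    PySem.List.slice_from _ h0, solBScan_eq_mkP, solBScan_eq_mkS]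
  rw [PySem.List.foldl_congr_mem _ _
      (fun best x => minStep best (winVal S.toList K x)) none
      (by
        intro acc x hxmem
        obtain ⟨hx0, hxW⟩ := (PySem.List.mem_pyRange_one).mp hxmem
        rw [lookupP S.toList K x h0 hKn hx0 hxW, lookupS S.toList K x h0 hKn hx0 hxW,
          windowTotal S.toList K x h0 hKn hx0 hxW]
        rfl)]
  rw [← List.foldl_map]
  have hW : (0:Int) < (S.toList.length : Int) - K := by omega
  rw [PySem.List.pyRange_one_cons hW, List.map_cons, foldl_minStep_eq_min?, ← List.map_cons,
    ← PySem.List.pyRange_one_cons hW]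

theorem sol_general (S : String) (K : Int) (h0 : 0 ≤ K) (h3 : K + 2 < (S.toList.length : Int)) :
    solution S K
      = (PySem.List.min? ((PySem.List.pyRange 0 ((S.toList.length : Int) - K) 1).map
          (winVal S.toList K)) (fun y => y)).getD 0 := by
  have h1 : ¬ ((S.toList.length : Int) ≤ K) := by omega
  have h2 : ¬ ((S.toList.length : Int) = K + 1) := by omega
  have h4 : ¬ ((S.toList.length : Int) = K + 2) := by omega
  simp only [solution, h1, h2, h4, if_false]
  rw [PySem.List.foldl_append_singleton_eq_map, List.nil_append]
  have hmap : (PySem.List.pyRange 0 ((S.toList.length : Int) - K) 1).map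
        (fun x => ((solAEncode (PySem.List.slice S.toList none (some x)
            ++ PySem.List.slice S.toList (some (x + K)) none)).length : Int))
      = (PySem.List.pyRange 0 ((S.toList.length : Int) - K) 1).map (winVal S.toList K) := by
    refine List.map_congr_left ?_
    intro x hxmem
    obtain ⟨hx0, hxW⟩ := (PySem.List.mem_pyRange_one).mp hxmem
    rw [PySem.List.slice_to _ hx0, PySem.List.slice_from _ (by omega : (0:Int) ≤ x + K),
      solA_encode_len, winVal, Int.toNat_add hx0 h0]
  rw [hmap]

theorem rleRuns_len1 (s : List Char) (h : s.length = 1) : rleRuns s = 1 := by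
  match s, h with
  | [c], _ => rw [rleRuns_cons' c []]; simp [rleRuns_nil, solBf_one]

theorem rleRuns_len2 (s : List Char) (h : s.length = 2) : rleRuns s = 2 := by
  match s, h with
  | [a, b], _ =>
    rw [rleRuns_cons' a [b]]
    by_cases hba : b = a
    · subst hba
      simp [List.takeWhile_cons, List.dropWhile_cons, rleRuns_nil]
      decide
    · have hb : (b == a) = false := by simp [hba]
      simp [List.takeWhile_cons, List.dropWhile_cons, hb, solBf_one]
      rw [rleRuns_len1 [b] (by simp)]
      norm_num

theorem main_eq (S : String) (K : Int) (h0 : 0 ≤ K) :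
    solution S K = solution_alt S K := by
  by_cases hn : (S.toList.length : Int) ≤ K
  · simp only [solution, solution_alt]
    rw [if_pos hn, if_pos (by omega : K ≥ (S.toList.length : Int))]
  · have hKn : K < (S.toList.length : Int) := by omega
    by_cases h1 : (S.toList.length : Int) = K + 1
    · rw [alt_general S K h0 hKn]
      have hsol : solution S K = 1 := by
        simp only [solution]
        rw [if_neg hn, if_pos h1]
      have hW : (S.toList.length : Int) - K = 1 := by omega
      rw [hsol, hW]
      have hr : PySem.List.pyRange 0 1 1 = [0] := by decide
      rw [hr, List.map_cons, List.map_nil, PySem.List.min?_id_cons, List.foldl_nil]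
      have hv : winVal S.toList K 0 = 1 := by
        rw [winVal]
        simp only [Int.toNat_zero, List.take_zero, List.nil_append, Nat.zero_add]
        exact rleRuns_len1 _ (by simp only [List.length_drop]; omega)
      rw [hv]
      rfl
    · by_cases h2 : (S.toList.length : Int) = K + 2
      · rw [alt_general S K h0 hKn]
        have hsol : solution S K = 2 := by
          simp only [solution]
          rw [if_neg hn, if_neg h1, if_pos h2]
        have hW : (S.toList.length : Int) - K = 2 := by omega
        rw [hsol, hW]
        have hr : PySem.List.pyRange 0 2 1 = [0, 1] := by decide
        have hv0 : winVal S.toList K 0 = 2 := by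
          rw [winVal]
          simp only [Int.toNat_zero, List.take_zero, List.nil_append, Nat.zero_add]
          exact rleRuns_len2 _ (by simp only [List.length_drop]; omega)
        have hv1 : winVal S.toList K 1 = 2 := by
          rw [winVal]
          exact rleRuns_len2 _ (by
            simp only [List.length_append, List.length_take, List.length_drop, Int.toNat_one]
            omega)
        rw [hr, List.map_cons, List.map_cons, List.map_nil, hv0, hv1, PySem.List.min?_id_cons]
        simp
      · have h3 : K + 2 < (S.toList.length : Int) := by omega
        rw [sol_general S K h0 h3, alt_general S K h0 hKn]

-- ===== VERDICT (by name: the statement is the Claim_ definition above) =====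
theorem solution_spec : Claim_equal_solution := by
  intro S K hDom hPre
  exact main_eq S K hPre
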